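-- pv_equiv track=rewrite | github.com/fcyi/uavmvs | traj_auto/tools/geo_tools.py | line_re_order
-- ===== SOURCE A (Python) =====
-- def line_re_order(lines_):
--     linesLen_ = len(lines_)
--     assert linesLen_ % 2 == 0, "线段端点需要为偶数"
--     linesCp_ = []
--     for lidx_ in range(0, linesLen_, 2):
--         linesCp_.append(lines_[lidx_+1])
--         linesCp_.append(lines_[lidx_])
--     return linesCp_
-- ===== SOURCE B (Python) =====
-- def line_re_order(lines_):
--     assert len(lines_) % 2 == 0, "线段端点需要为偶数"
--     res = list(lines_)
--     res[0::2], res[1::2] = res[1::2], res[0::2]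
--     return res
-- ===== Notes on version B (the rewrite author's own statement) =====
-- stated objective: idiomatic
-- what changed: Replaces the explicit index loop that appends each pair's two endpoints in swapped order with a copy plus a single simultaneous strided-slice swap res[0::2], res[1::2] = res[1::2], res[0::2], never forming explicit pairs.
import Mathlib
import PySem

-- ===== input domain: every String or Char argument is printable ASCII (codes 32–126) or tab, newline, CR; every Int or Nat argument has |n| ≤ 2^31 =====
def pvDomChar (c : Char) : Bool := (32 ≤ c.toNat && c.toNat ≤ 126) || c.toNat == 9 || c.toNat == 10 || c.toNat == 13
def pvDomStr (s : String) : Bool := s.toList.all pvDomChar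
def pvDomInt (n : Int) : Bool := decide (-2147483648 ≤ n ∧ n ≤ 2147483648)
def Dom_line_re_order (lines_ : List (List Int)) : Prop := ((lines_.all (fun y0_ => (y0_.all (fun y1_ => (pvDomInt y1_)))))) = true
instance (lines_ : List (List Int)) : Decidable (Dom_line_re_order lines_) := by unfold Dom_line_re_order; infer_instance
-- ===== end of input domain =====

-- B replaces A's index loop over pairs by a copy plus one simultaneous strided-slice swap (idiomatic; same cost).


-- ===== PORT A =====
def line_re_order (lines_ : List (List Int)) : List (List Int) :=
  let linesLen_ : Int := lines_.length
  if linesLen_ % 2 = 0 then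
    (PySem.List.pyRange 0 linesLen_ 2).foldl
      (fun linesCp_ lidx_ =>
        (linesCp_ ++ [PySem.List.pyGetD lines_ (lidx_ + 1) []])
          ++ [PySem.List.pyGetD lines_ lidx_ []])
      []
  else []  -- assert raises AssertionError on odd length; excluded by Pre_

-- ===== PORT B =====
-- B-side helper: the simultaneous strided assignment res[0::2], res[1::2] = odds, evens
-- realised as placing odds at even positions and evens at odd positions.
def pvStridedMerge : List (List Int) → List (List Int) → List (List Int)
  | [], ys => ys
  | x :: xs, [] => x :: xs
  | x :: xs, y :: ys => x :: y :: pvStridedMerge xs ys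

def line_re_order_alt (lines_ : List (List Int)) : List (List Int) :=
  if lines_.length % 2 = 0 then
    pvStridedMerge ((PySem.List.slice? lines_ (some 1) none 2).getD [])
                   ((PySem.List.slice? lines_ none none 2).getD [])
  else []  -- assert raises AssertionError on odd length; excluded by Pre_

-- ===== PRECONDITION & SPEC =====
-- Pre_ excludes odd-length inputs, on which A's assert raises AssertionError.
def Pre_line_re_order (lines_ : List (List Int)) : Prop := lines_.length % 2 = 0
instance (lines_ : List (List Int)) : Decidable (Pre_line_re_order lines_) := by unfold Pre_line_re_order; infer_instance
def pvWitness_line_re_order : List (List Int) := [[1, 2], [3, 4]]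

def Spec_line_re_order (lines_ : List (List Int)) (out : List (List Int)) : Prop := out = line_re_order_alt lines_
instance (lines_ : List (List Int)) (out : List (List Int)) : Decidable (Spec_line_re_order lines_ out) := by unfold Spec_line_re_order; infer_instance

-- ===== CLAIM (what is proved, stated in full; the proofs are below) =====
def Claim_equal_line_re_order : Prop := ∀ (lines_ : List (List Int)), Dom_line_re_order lines_ → Pre_line_re_order lines_ → Spec_line_re_order lines_ (line_re_order lines_)

-- ===== LEMMAS AND PROOFS =====

lemma pvA_eq_flatMap (xs : List (List Int)) (m : Nat) (h : xs.length = 2 * m) :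
    line_re_order xs
      = (List.range m).flatMap (fun k => [xs.getD (2 * k + 1) [], xs.getD (2 * k) []]) := by
  unfold line_re_order
  rw [if_pos (by omega : (xs.length : Int) % 2 = 0)]
  have hb : (fun (linesCp_ : List (List Int)) lidx_ =>
        (linesCp_ ++ [PySem.List.pyGetD xs (lidx_ + 1) []]) ++ [PySem.List.pyGetD xs lidx_ []])
      = fun linesCp_ lidx_ =>
        linesCp_ ++ ([PySem.List.pyGetD xs (lidx_ + 1) []] ++ [PySem.List.pyGetD xs lidx_ []]) := by
    funext a b; simp
  rw [hb, PySem.List.foldl_append_eq_flatMap, List.nil_append,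
      PySem.List.pyRange_of_pos 0 xs.length (by norm_num)]
  have hc : (if (0:Int) < xs.length then (((xs.length:Int) - 0 + 2 - 1) / 2).toNat else 0) = m := by
    split_ifs with h0 <;> omega
  rw [hc, List.flatMap_map]
  refine List.flatMap_congr ?_
  intro k hk
  rw [List.mem_range] at hk
  rw [PySem.List.pyGetD_of_nonneg _ _ (by positivity),
      PySem.List.pyGetD_of_nonneg _ _ (by positivity)]
  have h1 : ((0:Int) + 2 * (k:Int) + 1).toNat = 2 * k + 1 := by omega
  have h2 : ((0:Int) + 2 * (k:Int)).toNat = 2 * k := by omega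
  rw [h1, h2]
  rfl

lemma pvSliceEven (xs : List (List Int)) (m : Nat) (h : xs.length = 2 * m) :
    PySem.List.slice? xs none none 2
      = some ((List.range m).map (fun k => xs.getD (2 * k) [])) := by
  unfold PySem.List.slice? PySem.List.sliceIndices
  norm_num
  have hc : (if 0 < xs.length then (((xs.length:Int) + 2 - 1) / 2).toNat else 0) = m := by
    split_ifs <;> omega
  rw [hc, ← List.filterMap_eq_map (f := fun k => xs[2 * k]?.getD [])]
  apply List.filterMap_congr
  intro k hk
  rw [List.mem_range] at hk
  have ht : (2 * (k:Int)).toNat = 2 * k := by omega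
  rw [Function.comp_apply, ht, List.getElem?_eq_getElem (by omega)]
  simp

lemma pvSliceOdd (xs : List (List Int)) (m : Nat) (h : xs.length = 2 * m) (hm : 0 < m) :
    PySem.List.slice? xs (some 1) none 2
      = some ((List.range m).map (fun k => xs.getD (2 * k + 1) [])) := by
  unfold PySem.List.slice? PySem.List.sliceIndices
  norm_num
  have hs : min (1:Int) (xs.length:Int) = 1 := by omega
  rw [hs]
  have hc : (if 1 < xs.length then (((xs.length:Int) - 1 + 2 - 1) / 2).toNat else 0) = m := by
    split_ifs <;> omega
  rw [hc, ← List.filterMap_eq_map (f := fun k => xs[2 * k + 1]?.getD [])]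
  apply List.filterMap_congr
  intro k hk
  rw [List.mem_range] at hk
  have ht : ((1:Int) + 2 * (k:Int)).toNat = 2 * k + 1 := by omega
  rw [Function.comp_apply, ht, List.getElem?_eq_getElem (by omega)]
  simp

lemma pvMerge_eq (m : Nat) (f g : Nat → List Int) :
    pvStridedMerge ((List.range m).map f) ((List.range m).map g)
      = (List.range m).flatMap (fun k => [f k, g k]) := by
  induction m generalizing f g with
  | zero => simp [pvStridedMerge]
  | succ m ih =>
      rw [List.range_succ_eq_map]
      simp only [List.map_cons, List.map_map]
      rw [pvStridedMerge, ih (f ∘ Nat.succ) (g ∘ Nat.succ)]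
      simp [List.flatMap_map, Function.comp]

-- ===== VERDICT (by name: the statement is the Claim_ definition above) =====
theorem line_re_order_spec : Claim_equal_line_re_order := by
  intro xs _ hpre
  unfold Pre_line_re_order at hpre
  unfold Spec_line_re_order
  obtain ⟨m, hm⟩ : ∃ m, xs.length = 2 * m := ⟨xs.length / 2, by omega⟩
  rcases Nat.eq_zero_or_pos m with hm0 | hm0
  · subst hm0
    have : xs = [] := List.eq_nil_of_length_eq_zero (by omega)
    subst this
    decide
  rw [pvA_eq_flatMap xs m hm]
  unfold line_re_order_alt
  rw [if_pos hpre, pvSliceOdd xs m hm hm0, pvSliceEven xs m hm]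
  simp only [Option.getD_some]
  rw [pvMerge_eq]
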